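-- pv_equiv track=rewrite | github.com/roamz/sentimento | sentimento/tokenizer.py | join_negations
-- ===== SOURCE A (Python) =====
-- negative_stopwords = ['not', 'no', 'isn\'t', 'isnt', 'dont', 'don\'t']
--
-- def join_negations(tokens):
--
--     caught_stopword = None
--     grouped_tokenized = []
--     for w in tokens:
--         if w in negative_stopwords:
--             caught_stopword = w
--         else:
--             if caught_stopword:
--                 grouped_tokenized.append('{} {}'.format(caught_stopword, w))
--                 caught_stopword = None
--             else:
--                 grouped_tokenized.append(w)
--
--     return grouped_tokenized
-- ===== SOURCE B (Python) =====
-- negative_stopwords = ['not', 'no', 'isn\'t', 'isnt', 'dont', 'don\'t']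
--
-- def join_negations(tokens):
--     # Index-free look-back: pair each token with its predecessor; stopwords are
--     # never emitted; a non-stopword preceded by a stopword absorbs it.
--     out = []
--     for prev, w in zip([None] + tokens, tokens):
--         if w in negative_stopwords:
--             continue
--         if prev is not None and prev in negative_stopwords:
--             out.append('{} {}'.format(prev, w))
--         else:
--             out.append(w)
--     return out
-- ===== Notes on version B (the rewrite author's own statement) =====
-- stated objective: alternative
-- what changed: Replaces the caught_stopword state machine (store a stopword, consume and reset it at the next word) with a stateless look-back pass that pairs every token with its predecessor and decides each output element locally.
import Mathlib
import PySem

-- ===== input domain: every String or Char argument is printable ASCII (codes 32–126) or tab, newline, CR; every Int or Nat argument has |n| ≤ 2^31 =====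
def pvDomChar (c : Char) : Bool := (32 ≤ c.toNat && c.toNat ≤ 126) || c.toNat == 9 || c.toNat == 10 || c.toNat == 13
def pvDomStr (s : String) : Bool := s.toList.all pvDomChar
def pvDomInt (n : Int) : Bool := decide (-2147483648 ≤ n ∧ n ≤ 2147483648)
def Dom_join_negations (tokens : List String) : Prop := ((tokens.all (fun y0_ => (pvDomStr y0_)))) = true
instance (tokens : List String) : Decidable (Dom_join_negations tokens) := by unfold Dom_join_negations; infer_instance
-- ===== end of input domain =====

-- B replaces A's caught_stopword state machine by a stateless look-back over (predecessor, token) pairs; alternative decomposition, same cost.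

def negative_stopwords : List String := ["not", "no", "isn't", "isnt", "dont", "don't"]

-- ===== PORT A =====
-- state = (caught_stopword, grouped_tokenized); 'if caught_stopword:' is a truthiness
-- test, exact here because every stopword is a non-empty string.
def join_negations (tokens : List String) : List String :=
  (tokens.foldl
    (fun (st : Option String × List String) w =>
      if w ∈ negative_stopwords then (some w, st.2)
      else
        match st.1 with
        | some c => (none, st.2 ++ [c ++ " " ++ w])
        | none => (none, st.2 ++ [w]))
    (none, [])).2

-- ===== PORT B =====
-- zip([None] + tokens, tokens) pairs each token with its predecessor (zip truncates).
def join_negations_alt (tokens : List String) : List String :=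
  (((none :: tokens.map some).zip tokens).foldl
    (fun (out : List String) pw =>
      if pw.2 ∈ negative_stopwords then out
      else
        match pw.1 with
        | some p =>
          if p ∈ negative_stopwords then out ++ [p ++ " " ++ pw.2]
          else out ++ [pw.2]
        | none => out ++ [pw.2])
    [])

-- ===== PRECONDITION & SPEC =====
def Spec_join_negations (tokens : List String) (out : List String) : Prop := out = join_negations_alt tokens
instance (tokens : List String) (out : List String) : Decidable (Spec_join_negations tokens out) := by unfold Spec_join_negations; infer_instance

-- ===== CLAIM (what is proved, stated in full; the proofs are below) =====
def Claim_equal_join_negations : Prop := ∀ (tokens : List String), Dom_join_negations tokens → Spec_join_negations tokens (join_negations tokens)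

-- ===== LEMMAS AND PROOFS =====

-- Structural recursion equivalent of A's loop body (proof-only helper).
def recA (c : Option String) : List String → List String
  | [] => []
  | w :: ws =>
    if w ∈ negative_stopwords then recA (some w) ws
    else
      match c with
      | some p => (p ++ " " ++ w) :: recA none ws
      | none => w :: recA none ws

-- Structural recursion equivalent of B's loop over predecessor pairs (proof-only helper).
def recB (prev : Option String) : List String → List String
  | [] => []
  | w :: ws =>
    (if w ∈ negative_stopwords then []
     else
       match prev with
       | some p => if p ∈ negative_stopwords then [p ++ " " ++ w] else [w]
       | none => [w]) ++ recB (some w) ws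

theorem foldlA_eq_recA (ws : List String) (c : Option String) (acc : List String) :
    (ws.foldl
      (fun (st : Option String × List String) w =>
        if w ∈ negative_stopwords then (some w, st.2)
        else
          match st.1 with
          | some c => (none, st.2 ++ [c ++ " " ++ w])
          | none => (none, st.2 ++ [w]))
      (c, acc)).2 = acc ++ recA c ws := by
  induction ws generalizing c acc with
  | nil => simp [recA]
  | cons w ws ih =>
    simp only [List.foldl_cons, recA]
    by_cases h : w ∈ negative_stopwords
    · simp [h, ih]
    · cases c <;> simp [h, ih]

theorem foldlB_eq_recB (ws : List String) (prev : Option String) (acc : List String) :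
    (((prev :: ws.map some).zip ws).foldl
      (fun (out : List String) pw =>
        if pw.2 ∈ negative_stopwords then out
        else
          match pw.1 with
          | some p =>
            if p ∈ negative_stopwords then out ++ [p ++ " " ++ pw.2]
            else out ++ [pw.2]
          | none => out ++ [pw.2])
      acc) = acc ++ recB prev ws := by
  induction ws generalizing prev acc with
  | nil => simp [recB]
  | cons w ws ih =>
    simp only [List.map_cons, List.zip_cons_cons, List.foldl_cons, recB]
    by_cases h : w ∈ negative_stopwords
    · simp [h, ih]
    · cases prev with
      | none => simp [h, ih]
      | some p =>
        by_cases hp : p ∈ negative_stopwords <;> simp [h, hp, ih]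

theorem recA_eq_recB (ws : List String) (c prev : Option String)
    (hrel : c = match prev with
      | some p => if p ∈ negative_stopwords then some p else none
      | none => none) :
    recA c ws = recB prev ws := by
  induction ws generalizing c prev with
  | nil => simp [recA, recB]
  | cons w ws ih =>
    simp only [recA, recB]
    by_cases h : w ∈ negative_stopwords
    · rw [ih (some w) (some w) (by simp [h])]
      simp [h]
    · have hrec := ih none (some w) (by simp [h])
      cases prev with
      | none => subst hrel; simp [h, hrec]
      | some p =>
        by_cases hp : p ∈ negative_stopwords
        · simp only [hp, if_true] at hrel; subst hrel; simp [h, hp, hrec]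
        · simp only [hp, if_false] at hrel; subst hrel; simp [h, hp, hrec]

-- ===== VERDICT (by name: the statement is the Claim_ definition above) =====
theorem join_negations_spec : Claim_equal_join_negations := by
  intro tokens _
  unfold Spec_join_negations join_negations join_negations_alt
  rw [foldlA_eq_recA, foldlB_eq_recB, List.nil_append, List.nil_append]
  exact recA_eq_recB tokens none none rfl
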